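-- pv_equiv track=rewrite | github.com/roctbb/ai-game-engine | games/energy_race/engine.py | _placements
-- ===== SOURCE A (Python) =====
-- _SLOTS = ("solar", "lunar")
--
-- def _placements(team_ids: dict[str, str], slot_scores: dict[str, int]) -> dict[str, int]:
--     ordered = sorted(_SLOTS, key=lambda slot: slot_scores[slot], reverse=True)
--     result: dict[str, int] = {}
--     last_score: int | None = None
--     last_place = 0
--     for index, slot in enumerate(ordered, start=1):
--         score = slot_scores[slot]
--         if score != last_score:
--             last_place = index
--             last_score = score
--         result[team_ids[slot]] = last_place
--     return result
-- ===== SOURCE B (Python) =====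
-- def _placements(team_ids: dict[str, str], slot_scores: dict[str, int]) -> dict[str, int]:
--     a = slot_scores["solar"]
--     b = slot_scores["lunar"]
--     result: dict[str, int] = {}
--     if a == b:
--         result[team_ids["solar"]] = 1
--         result[team_ids["lunar"]] = 1
--     elif a > b:
--         result[team_ids["solar"]] = 1
--         result[team_ids["lunar"]] = 2
--     else:
--         result[team_ids["lunar"]] = 1
--         result[team_ids["solar"]] = 2
--     return result
-- ===== Notes on version B (the rewrite author's own statement) =====
-- stated objective: simpler
-- what changed: Replaces the generic sort-then-rank loop (sorted with a key, enumerate, last_score/last_place tie bookkeeping) by a direct three-way comparison of the two fixed slots' scores, writing the winner first so last-write-wins on duplicate team ids matches A.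
import Mathlib
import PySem

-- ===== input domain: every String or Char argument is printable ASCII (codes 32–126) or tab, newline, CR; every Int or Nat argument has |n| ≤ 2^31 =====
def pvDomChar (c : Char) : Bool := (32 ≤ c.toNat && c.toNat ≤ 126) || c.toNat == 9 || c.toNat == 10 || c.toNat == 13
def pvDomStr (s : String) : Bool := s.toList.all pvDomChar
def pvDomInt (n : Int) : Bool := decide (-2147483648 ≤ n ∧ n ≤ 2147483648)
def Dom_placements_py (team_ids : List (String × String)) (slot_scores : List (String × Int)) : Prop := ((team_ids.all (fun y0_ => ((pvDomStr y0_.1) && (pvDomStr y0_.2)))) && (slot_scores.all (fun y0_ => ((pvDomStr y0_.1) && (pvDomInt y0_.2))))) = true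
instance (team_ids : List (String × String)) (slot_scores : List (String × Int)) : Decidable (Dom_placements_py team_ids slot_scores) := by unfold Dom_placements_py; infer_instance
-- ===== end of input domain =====

-- B replaces A's sort + rank loop by a direct three-way comparison of the two fixed slots' scores (return-value equivalence; neither mutates its arguments).

-- ===== PORT A =====
-- literal port of A: sorted(_SLOTS, key=..., reverse=True), then the enumerate loop with
-- last_score/last_place state; dict lookups use getD, valid under Pre_ (KeyError excluded there)
def placements_py (team_ids : List (String × String)) (slot_scores : List (String × Int)) : List (String × Int) :=
  let td := PySem.Dict.mk team_ids
  let sd := PySem.Dict.mk slot_scores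
  let ordered := PySem.List.sorted ["solar", "lunar"] (fun slot => sd.getD slot 0) true
  let fin := ordered.foldl
    (fun (st : PySem.Dict String Int × Option Int × Int × Int) slot =>
      let result := st.1
      let last_score := st.2.1
      let last_place := st.2.2.1
      let index := st.2.2.2 + 1
      let score := sd.getD slot 0
      let lp := if some score ≠ last_score then index else last_place
      let ls := if some score ≠ last_score then some score else last_score
      (result.insert (td.getD slot "") lp, ls, lp, index))
    (PySem.Dict.empty, none, 0, 0)
  fin.1.items

-- ===== PORT B =====
def placements_py_alt (team_ids : List (String × String)) (slot_scores : List (String × Int)) : List (String × Int) :=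
  let td := PySem.Dict.mk team_ids
  let sd := PySem.Dict.mk slot_scores
  let a := sd.getD "solar" 0
  let b := sd.getD "lunar" 0
  if a = b then
    ((PySem.Dict.empty.insert (td.getD "solar" "") 1).insert (td.getD "lunar" "") 1).items
  else if a > b then
    ((PySem.Dict.empty.insert (td.getD "solar" "") 1).insert (td.getD "lunar" "") 2).items
  else
    ((PySem.Dict.empty.insert (td.getD "lunar" "") 1).insert (td.getD "solar" "") 2).items

-- ===== PRECONDITION & SPEC =====
-- Pre_ excludes exactly the inputs where Python raises KeyError: both dicts must contain "solar" and "lunar"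
def Pre_placements_py (team_ids : List (String × String)) (slot_scores : List (String × Int)) : Prop :=
  (PySem.Dict.mk slot_scores).contains "solar" = true ∧
  (PySem.Dict.mk slot_scores).contains "lunar" = true ∧
  (PySem.Dict.mk team_ids).contains "solar" = true ∧
  (PySem.Dict.mk team_ids).contains "lunar" = true
instance (team_ids : List (String × String)) (slot_scores : List (String × Int)) : Decidable (Pre_placements_py team_ids slot_scores) := by unfold Pre_placements_py; infer_instance
def pvWitness_placements_py : (List (String × String)) × (List (String × Int)) :=
  ([("solar", "t1"), ("lunar", "t2")], [("solar", 3), ("lunar", 5)])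
def Spec_placements_py (team_ids : List (String × String)) (slot_scores : List (String × Int)) (out : List (String × Int)) : Prop := out = placements_py_alt team_ids slot_scores
instance (team_ids : List (String × String)) (slot_scores : List (String × Int)) (out : List (String × Int)) : Decidable (Spec_placements_py team_ids slot_scores out) := by unfold Spec_placements_py; infer_instance

-- ===== CLAIM (what is proved, stated in full; the proofs are below) =====
def Claim_equal_placements_py : Prop := ∀ (team_ids : List (String × String)) (slot_scores : List (String × Int)), Dom_placements_py team_ids slot_scores → Pre_placements_py team_ids slot_scores → Spec_placements_py team_ids slot_scores (placements_py team_ids slot_scores)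

-- ===== LEMMAS AND PROOFS =====

-- ===== VERDICT (by name: the statement is the Claim_ definition above) =====
theorem placements_py_spec : Claim_equal_placements_py := by
  intro t s _ _
  unfold Spec_placements_py placements_py placements_py_alt
  rcases lt_trichotomy ((PySem.Dict.mk s).getD "solar" 0) ((PySem.Dict.mk s).getD "lunar" 0) with h | h | h
  · simp [PySem.List.sorted, PySem.List.insertBy, h, not_lt.mpr h.le, h.ne, List.foldl]
  · simp [PySem.List.sorted, PySem.List.insertBy, h, List.foldl]
  · simp [PySem.List.sorted, PySem.List.insertBy, h, not_lt.mpr h.le, h.ne, h.ne', List.foldl]
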